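-- pv_equiv track=rewrite | github.com/nowstartboy/my_code_new | the_exam/weiruan2.py | maxDegreeAnnoyance
-- ===== SOURCE A (Python) =====
-- def maxDegreeAnnoyance(numOfFriends,height):
--     max_annoy=0
--     for i in range(1,numOfFriends):
--         u =0
--         j=i
--         key=height[i]
--         while j>0 and key<height[j-1]:
--             height[j]=height[j-1]
--             u +=1
--             j -=1
--         height[j]=key
--         max_annoy=max(max_annoy,u)
--     return max_annoy
-- ===== SOURCE B (Python) =====
-- def maxDegreeAnnoyance(numOfFriends, height):
--     # Count, for each position i, how many earlier elements are greater than
--     # height[i] (its inversion count); the answer is the maximum such count.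
--     # Unlike A, this does not mutate `height`.
--     max_annoy = 0
--     for i in range(1, numOfFriends):
--         c = sum(1 for j in range(i) if height[j] > height[i])
--         if c > max_annoy:
--             max_annoy = c
--     return max_annoy
-- ===== Notes on version B (the rewrite author's own statement) =====
-- stated objective: alternative
-- what changed: B replaces A's in-place insertion-sort simulation (shifting elements and counting moves per insertion) by a pure pairwise inversion count per index, with no mutation of the input list.
import Mathlib
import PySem

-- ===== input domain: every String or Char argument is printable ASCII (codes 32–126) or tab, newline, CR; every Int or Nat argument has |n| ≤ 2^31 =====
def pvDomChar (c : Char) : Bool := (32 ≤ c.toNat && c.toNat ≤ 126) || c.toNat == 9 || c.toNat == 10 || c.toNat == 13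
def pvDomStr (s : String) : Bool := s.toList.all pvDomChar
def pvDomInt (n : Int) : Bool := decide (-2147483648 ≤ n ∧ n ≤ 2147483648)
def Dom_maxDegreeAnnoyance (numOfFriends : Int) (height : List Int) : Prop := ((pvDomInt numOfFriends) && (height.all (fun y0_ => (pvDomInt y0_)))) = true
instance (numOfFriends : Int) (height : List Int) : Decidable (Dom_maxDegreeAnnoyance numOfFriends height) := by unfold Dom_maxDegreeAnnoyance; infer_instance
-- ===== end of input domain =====

-- B replaces A's in-place insertion-sort shift simulation by a pure pairwise
-- inversion count per index (alternative algorithm; the equivalence proved is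
-- about the RETURN value only — Python A sorts the prefix of its argument in
-- place, B does not mutate it).


-- ===== PORT A =====
-- inner `while j>0 and key<height[j-1]: height[j]=height[j-1]; u+=1; j-=1`,
-- state (list, u, j); under Pre_ every index is in range, so the total
-- pyGetD/pySetD forms compute exactly what Python computes there.
def pvAInner : List Int → Int → Nat → Int → List Int × Int × Nat
  | h, key, j, u =>
    if 0 < j ∧ key < PySem.List.pyGetD h ((j : Int) - 1) 0 then
      pvAInner (PySem.List.pySetD h (j : Int) (PySem.List.pyGetD h ((j : Int) - 1) 0))
        key (j - 1) (u + 1)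
    else (h, u, j)
  termination_by h key j u => j
  decreasing_by omega

-- one iteration of A's `for i in range(1, numOfFriends)` loop, state (height, max_annoy)
def pvAStep (acc : List Int × Int) (i : Int) : List Int × Int :=
  let key := PySem.List.pyGetD acc.1 i 0
  let res := pvAInner acc.1 key i.toNat 0
  (PySem.List.pySetD res.1 (res.2.2 : Int) key, max acc.2 res.2.1)

def maxDegreeAnnoyance (numOfFriends : Int) (height : List Int) : Int :=
  ((PySem.List.pyRange 1 numOfFriends 1).foldl pvAStep (height, 0)).2

-- ===== PORT B =====
-- one iteration of B's loop: c = sum(1 for j in range(i) if height[j] > height[i])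
def pvBStep (height : List Int) (m : Int) (i : Int) : Int :=
  let c := ((PySem.List.pyRange 0 i 1).map
    (fun j => if PySem.List.pyGetD height j 0 > PySem.List.pyGetD height i 0 then (1 : Int) else 0)).sum
  if c > m then c else m

def maxDegreeAnnoyance_alt (numOfFriends : Int) (height : List Int) : Int :=
  (PySem.List.pyRange 1 numOfFriends 1).foldl (pvBStep height) 0

-- ===== PRECONDITION & SPEC =====
-- Pre_ excludes exactly the inputs where Python A raises IndexError (and B raises too):
-- numOfFriends ≥ 2 together with numOfFriends > len(height) makes the loop read height[i] out of range.
def Pre_maxDegreeAnnoyance (numOfFriends : Int) (height : List Int) : Prop :=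
  numOfFriends ≤ (height.length : Int) ∨ numOfFriends ≤ 1
instance (numOfFriends : Int) (height : List Int) : Decidable (Pre_maxDegreeAnnoyance numOfFriends height) := by unfold Pre_maxDegreeAnnoyance; infer_instance

def pvWitness_maxDegreeAnnoyance : Int × List Int := (4, [3, 1, 4, 2])

def Spec_maxDegreeAnnoyance (numOfFriends : Int) (height : List Int) (out : Int) : Prop := out = maxDegreeAnnoyance_alt numOfFriends height
instance (numOfFriends : Int) (height : List Int) (out : Int) : Decidable (Spec_maxDegreeAnnoyance numOfFriends height out) := by unfold Spec_maxDegreeAnnoyance; infer_instance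

-- ===== CLAIM (what is proved, stated in full; the proofs are below) =====
def Claim_equal_maxDegreeAnnoyance : Prop := ∀ (numOfFriends : Int) (height : List Int), Dom_maxDegreeAnnoyance numOfFriends height → Pre_maxDegreeAnnoyance numOfFriends height → Spec_maxDegreeAnnoyance numOfFriends height (maxDegreeAnnoyance numOfFriends height)

-- ===== LEMMAS AND PROOFS =====

lemma pvGetMid (l : List Int) (x d : Int) (r : List Int) :
    PySem.List.pyGetD (l ++ x :: r) (l.length : Int) d = x := by
  rw [PySem.List.pyGetD_natCast]; simp [List.getD]

lemma pvSetMid (l : List Int) (x : Int) (r : List Int) (v : Int) :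
    (l ++ x :: r).set l.length v = l ++ v :: r := by
  rw [List.set_append_right _ _ (Nat.le_refl _)]; simp

lemma pvAIns_spec (key : Int) (S : List Int) (hS : S.Pairwise (· ≤ ·)) :
    ∀ (x : Int) (r : List Int) (u : Int),
    (PySem.List.pySetD (pvAInner (S ++ x :: r) key S.length u).1
        (((pvAInner (S ++ x :: r) key S.length u).2.2 : Nat) : Int) key,
      (pvAInner (S ++ x :: r) key S.length u).2.1) =
    (S.filter (fun b => !decide (key < b)) ++ key :: (S.filter (fun b => decide (key < b)) ++ r),
      u + ((S.filter (fun b => decide (key < b))).length : Int)) := by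
  induction S using List.reverseRecOn with
  | nil =>
    intro x r u
    rw [pvAInner]
    simp only [List.nil_append, List.length_nil, lt_self_iff_false, false_and, if_false]
    simp only [PySem.List.pySetD_natCast]
    simp
  | append_singleton q a ih =>
    intro x r u
    have hq : q.Pairwise (· ≤ ·) := hS.sublist (List.sublist_append_left _ _)
    have hle : ∀ b ∈ q, b ≤ a := by
      intro b hb
      exact (List.pairwise_append.mp hS).2.2 b hb a (List.mem_singleton_self a)
    have hcast : ((q.length + 1 : Nat) : Int) - 1 = (q.length : Int) := by push_cast; ring
    have hshape : q ++ [a] ++ x :: r = q ++ a :: (x :: r) := by simp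
    by_cases hk : key < a
    · rw [pvAInner]
      rw [List.length_append]
      simp only [List.length_singleton, hcast, hshape, pvGetMid]
      rw [if_pos ⟨Nat.succ_pos _, hk⟩]
      have hset : (q ++ a :: (x :: r)).set (q.length + 1) a = q ++ a :: (a :: r) := by
        have := pvSetMid (q ++ [a]) x (r) a
        simpa using this
      simp only [PySem.List.pySetD_natCast]
      rw [hset]
      have h1 : q.length + 1 - 1 = q.length := rfl
      rw [h1]
      have hih := ih hq a (a :: r) (u + 1)
      simp only [PySem.List.pySetD_natCast] at hih
      rw [hih]
      have hfa : (List.filter (fun b => decide (key < b)) (q ++ [a])) =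
          List.filter (fun b => decide (key < b)) q ++ [a] := by
        simp [List.filter_append, hk]
      have hfb : (List.filter (fun b => !decide (key < b)) (q ++ [a])) =
          List.filter (fun b => !decide (key < b)) q := by
        simp [List.filter_append, hk]
      rw [hfa, hfb]
      refine Prod.ext ?_ ?_
      · simp
      · simp only [List.length_append, List.length_singleton]
        push_cast
        ring
    · rw [pvAInner]
      rw [List.length_append]
      simp only [List.length_singleton, hcast, hshape, pvGetMid]
      rw [if_neg (by rintro ⟨-, hlt⟩; exact hk hlt)]
      simp only []
      have hfilt_pos : (q ++ [a]).filter (fun b => decide (key < b)) = [] := by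
        rw [List.filter_eq_nil_iff]
        intro b hb
        simp only [decide_eq_true_eq]
        rcases List.mem_append.mp hb with h1 | h1
        · have := hle b h1
          omega
        · simp at h1; omega
      have hfilt_neg : (q ++ [a]).filter (fun b => !decide (key < b)) = q ++ [a] := by
        rw [List.filter_eq_self]
        intro b hb
        simp only [Bool.not_eq_true', decide_eq_false_iff_not]
        rcases List.mem_append.mp hb with h1 | h1
        · have := hle b h1; omega
        · simp at h1; omega
      rw [hfilt_pos, hfilt_neg]
      have hset2 : (q ++ a :: (x :: r)).set (q.length + 1) key = q ++ a :: (key :: r) := by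
        have := pvSetMid (q ++ [a]) x r key
        simpa using this
      simp only [PySem.List.pySetD_natCast]
      rw [hset2]
      simp

lemma pvCount_range (h₀ : List Int) (key : Int) :
    ∀ (m : Nat), m ≤ h₀.length →
    ((List.range m).map (fun j => if key < h₀.getD j 0 then (1 : Int) else 0)).sum =
      (((h₀.take m).filter (fun b => decide (key < b))).length : Int) := by
  intro m
  induction m with
  | zero => intro _; simp
  | succ m ih =>
    intro hm
    have hmlt : m < h₀.length := by omega
    rw [List.range_succ, List.map_append, List.sum_append, ih (by omega)]
    rw [List.take_succ]
    have : h₀[m]?.toList = [h₀[m]] := by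
      rw [List.getElem?_eq_getElem hmlt]; rfl
    rw [this, List.filter_append]
    have hget : h₀.getD m 0 = h₀[m] := List.getD_eq_getElem h₀ 0 hmlt
    by_cases hb : key < h₀[m]
    · simp [hb, List.getElem?_eq_getElem hmlt]
    · simp [hb, List.getElem?_eq_getElem hmlt]

lemma pvCount_b (h₀ : List Int) (k : Nat) (hk : k + 1 ≤ h₀.length) :
    ((PySem.List.pyRange 0 (1 + (k : Int)) 1).map
      (fun j => if PySem.List.pyGetD h₀ j 0 > PySem.List.pyGetD h₀ (1 + (k : Int)) 0 then (1 : Int) else 0)).sum =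
    (((h₀.take (k + 1)).filter (fun b => decide (PySem.List.pyGetD h₀ (1 + (k : Int)) 0 < b))).length : Int) := by
  rw [PySem.List.pyRange_one]
  rw [List.map_map]
  have h1 : ((1 + (k : Int)) - 0).toNat = k + 1 := by omega
  rw [h1]
  have h2 : ∀ j : Nat, ((fun j => if PySem.List.pyGetD h₀ j 0 > PySem.List.pyGetD h₀ (1 + (k : Int)) 0 then (1:Int) else 0) ∘ (fun j : Nat => 0 + (j : Int))) j
      = (fun j : Nat => if PySem.List.pyGetD h₀ (1 + (k : Int)) 0 < h₀.getD j 0 then (1:Int) else 0) j := by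
    intro j
    simp only [Function.comp, zero_add, PySem.List.pyGetD_natCast]
  rw [List.map_congr_left (fun j _ => h2 j)]
  exact pvCount_range h₀ _ (k+1) hk

lemma pvMainInv (h₀ : List Int) :
    ∀ (k : Nat), k + 1 ≤ h₀.length →
    ∃ S : List Int, S.Pairwise (· ≤ ·) ∧ S.Perm (h₀.take (k + 1)) ∧
      (PySem.List.pyRange 1 (1 + (k : Int)) 1).foldl pvAStep (h₀, 0) =
        (S ++ h₀.drop (k + 1),
         (PySem.List.pyRange 1 (1 + (k : Int)) 1).foldl (pvBStep h₀) 0) := by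
  intro k
  induction k with
  | zero =>
    intro hk
    refine ⟨h₀.take 1, ?_, List.Perm.refl _, ?_⟩
    · rcases h₀ with _ | ⟨a, t⟩
      · simp at hk
      · simp
    · rw [PySem.List.pyRange_one_eq_nil (by omega)]
      simp only [List.foldl_nil]
      nth_rewrite 1 [← List.take_append_drop 1 h₀]
      rfl
  | succ k ih =>
    intro hk
    obtain ⟨S, hSsort, hSperm, hfold⟩ := ih (by omega)
    have hlen : S.length = k + 1 := by
      rw [hSperm.length_eq, List.length_take]; omega
    have hklt : k + 1 < h₀.length := by omega
    -- split the range
    have hsplit : PySem.List.pyRange 1 (1 + ((k+1 : Nat) : Int)) 1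
        = PySem.List.pyRange 1 (1 + (k : Int)) 1 ++ [1 + (k : Int)] := by
      have : (1 + ((k+1 : Nat) : Int)) = (1 + (k : Int)) + 1 := by push_cast; ring
      rw [this, PySem.List.pyRange_one_succ_right (by omega)]
    rw [hsplit, List.foldl_append, List.foldl_append, hfold]
    -- the drop splits off the next element
    have hdrop : h₀.drop (k + 1) = h₀[k+1] :: h₀.drop (k + 2) :=
      List.drop_eq_getElem_cons hklt
    set key := PySem.List.pyGetD h₀ (1 + (k : Int)) 0 with hkey
    have hkeyv : key = h₀[k+1] := by
      rw [hkey, show (1 + (k : Int)) = ((k+1 : Nat) : Int) by push_cast; ring,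
        PySem.List.pyGetD_natCast]
      exact List.getD_eq_getElem h₀ 0 hklt
    -- A's step
    have hgetkey : PySem.List.pyGetD (S ++ h₀.drop (k+1)) (1 + (k : Int)) 0 = key := by
      rw [hdrop, show (1 + (k : Int)) = (S.length : Int) by rw [hlen]; push_cast; ring]
      rw [pvGetMid]
      rw [hkeyv]
    have htonat : (1 + (k : Int)).toNat = S.length := by omega
    have hAstep : pvAStep (S ++ h₀.drop (k+1), (PySem.List.pyRange 1 (1 + (k : Int)) 1).foldl (pvBStep h₀) 0) (1 + (k : Int))
        = ((S.filter (fun b => !decide (key < b)) ++ key :: (S.filter (fun b => decide (key < b)) ++ h₀.drop (k+2))),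
           max ((PySem.List.pyRange 1 (1 + (k : Int)) 1).foldl (pvBStep h₀) 0) ((S.filter (fun b => decide (key < b))).length : Int)) := by
      simp only [pvAStep, hgetkey, htonat]
      rw [hdrop]
      have hins := pvAIns_spec key S hSsort (h₀[k+1]) (h₀.drop (k+2)) 0
      rw [Prod.mk.injEq] at hins
      refine Prod.ext hins.1 ?_
      show max _ (pvAInner (S ++ h₀[k + 1] :: List.drop (k + 2) h₀) key S.length 0).2.1 = _
      rw [hins.2]
      simp
    rw [List.foldl_cons, List.foldl_nil, List.foldl_cons, List.foldl_nil, hAstep]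
    -- B's step: the count equals the number of earlier-greater elements
    set m := (PySem.List.pyRange 1 (1 + (k : Int)) 1).foldl (pvBStep h₀) 0 with hm
    have hBstep : pvBStep h₀ m (1 + (k : Int))
        = max m ((S.filter (fun b => decide (key < b))).length : Int) := by
      have hcnt := pvCount_b h₀ k (by omega)
      have hflen : ((h₀.take (k+1)).filter (fun b => decide (key < b))).length
          = (S.filter (fun b => decide (key < b))).length :=
        ((hSperm.filter _).length_eq).symm
      simp only [pvBStep, gt_iff_lt]
      rw [hcnt, hflen]
      split_ifs <;> omega
    have htd : List.Perm (S.filter (fun b => !decide (key < b)) ++ S.filter (fun b => decide (key < b))) S := by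
      have h1 : S.filter (fun b => !!decide (key < b)) = S.filter (fun b => decide (key < b)) := by
        simp
      have := List.filter_append_perm (fun b => !decide (key < b)) S
      rw [h1] at this
      exact this
    refine ⟨S.filter (fun b => !decide (key < b)) ++ key :: S.filter (fun b => decide (key < b)), ?_, ?_, ?_⟩
    · -- sortedness of the new prefix
      have ht : (S.filter (fun b => !decide (key < b))).Pairwise (· ≤ ·) := hSsort.filter _
      have hd : (S.filter (fun b => decide (key < b))).Pairwise (· ≤ ·) := hSsort.filter _
      rw [List.pairwise_append]
      refine ⟨ht, ?_, ?_⟩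
      · rw [List.pairwise_cons]
        refine ⟨fun b hb => ?_, hd⟩
        have := (List.mem_filter.mp hb).2
        simp only [decide_eq_true_eq] at this
        exact le_of_lt this
      · intro b hb c hc
        have hbk : key < b → False := by
          have := (List.mem_filter.mp hb).2
          simp only [Bool.not_eq_true', decide_eq_false_iff_not] at this
          exact this
        have hbk' : b ≤ key := not_lt.mp (fun hlt => hbk hlt)
        rcases List.mem_cons.mp hc with rfl | hc
        · exact hbk'
        · have := (List.mem_filter.mp hc).2
          simp only [decide_eq_true_eq] at this
          exact le_of_lt (lt_of_le_of_lt hbk' this)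
    · -- permutation with the (k+2)-prefix
      have htake : h₀.take (k+1+1) = h₀.take (k+1) ++ [h₀[k+1]] := by
        rw [List.take_succ, List.getElem?_eq_getElem hklt]
        rfl
      refine List.Perm.trans List.perm_middle ?_
      refine List.Perm.trans ((htd.trans hSperm).cons key) ?_
      rw [htake, hkeyv]
      exact (List.perm_append_singleton _ _).symm
    · -- the fold equation
      rw [hBstep]
      refine Prod.ext ?_ rfl
      simp

-- ===== VERDICT (by name: the statement is the Claim_ definition above) =====
theorem maxDegreeAnnoyance_spec : Claim_equal_maxDegreeAnnoyance := by
  intro n h _ hpre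
  unfold Spec_maxDegreeAnnoyance maxDegreeAnnoyance maxDegreeAnnoyance_alt
  by_cases hn : n ≤ 1
  · rw [PySem.List.pyRange_one_eq_nil hn]
    rfl
  · have hlen : n ≤ (h.length : Int) := by
      rcases hpre with h1 | h1
      · exact h1
      · omega
    set k : Nat := (n - 1).toNat with hkdef
    have hkn : (1 : Int) + (k : Int) = n := by omega
    have hkl : k + 1 ≤ h.length := by omega
    obtain ⟨S, _, _, hfold⟩ := pvMainInv h k hkl
    rw [← hkn, hfold]
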